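-- pv_equiv track=rewrite | github.com/johnmoses/zero-to-hero-python-dsa | sliding_window/longest_substring.py | findLongestSubstring1
-- ===== SOURCE A (Python) =====
-- def findLongestSubstring1(s):
--     vowels = set('aeiou')
--     longest = 0
--     current = 0
--     for char in s:
--         if char in vowels:
--             current = 0
--         else:
--             current += 1
--             longest = max(longest, current)
--     return longest
-- ===== SOURCE B (Python) =====
-- def findLongestSubstring1(s):
--     # Gap-between-vowels algorithm: record the vowel positions (with sentinels
--     # -1 and len(s)) and return the largest distance between consecutive cuts.
--     cuts = [-1] + [i for i, c in enumerate(s) if c in 'aeiou'] + [len(s)]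
--     return max((b - a - 1 for a, b in zip(cuts, cuts[1:])), default=0)
-- ===== Notes on version B (the rewrite author's own statement) =====
-- stated objective: alternative
-- what changed: Replaces the running counter that is reset at each vowel by a gap algorithm: collect the vowel positions (with sentinels -1 and len(s)) and return the maximum gap between consecutive positions.
import Mathlib
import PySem

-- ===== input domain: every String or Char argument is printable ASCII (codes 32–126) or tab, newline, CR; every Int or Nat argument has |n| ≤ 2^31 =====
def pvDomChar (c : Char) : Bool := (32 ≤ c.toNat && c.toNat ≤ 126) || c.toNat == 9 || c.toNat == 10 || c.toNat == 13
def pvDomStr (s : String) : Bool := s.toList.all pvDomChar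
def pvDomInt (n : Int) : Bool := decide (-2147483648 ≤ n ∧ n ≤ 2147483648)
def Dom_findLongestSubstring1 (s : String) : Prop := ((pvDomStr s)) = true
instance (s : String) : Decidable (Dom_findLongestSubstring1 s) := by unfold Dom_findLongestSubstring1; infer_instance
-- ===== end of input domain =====

-- B replaces A's running counter (reset at each vowel) by a different algorithm:
-- vowel positions with sentinels -1 and len(s), answer = max gap between consecutive cuts.


-- ===== PORT A =====
-- literal port of A: foldl over the characters with state (longest, current)
def findLongestSubstring1 (s : String) : Int :=
  let vowels : PySem.Set Char := PySem.Set.ofList "aeiou".toList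
  (s.toList.foldl
    (fun (st : Int × Int) char =>
      if vowels.contains char then (st.1, 0)
      else (max st.1 (st.2 + 1), st.2 + 1))
    (0, 0)).1

-- ===== PORT B =====
-- literal port of Source B; `c in 'aeiou'` for the single char c is membership, ported as List.contains
def findLongestSubstring1_alt (s : String) : Int :=
  let cuts : List Int :=
    [-1] ++ (PySem.List.enumerate s.toList 0).filterMap
      (fun p => if "aeiou".toList.contains p.2 then some p.1 else none)
      ++ [PySem.Str.len s]
  let diffs : List Int :=
    (cuts.zip (PySem.List.slice cuts (some 1) none)).map (fun q => q.2 - q.1 - 1)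
  PySem.List.maxD diffs id 0

-- ===== PRECONDITION & SPEC =====
def Spec_findLongestSubstring1 (s : String) (out : Int) : Prop := out = findLongestSubstring1_alt s
instance (s : String) (out : Int) : Decidable (Spec_findLongestSubstring1 s out) := by unfold Spec_findLongestSubstring1; infer_instance

-- ===== CLAIM (what is proved, stated in full; the proofs are below) =====
def Claim_equal_findLongestSubstring1 : Prop := ∀ (s : String), Dom_findLongestSubstring1 s → Spec_findLongestSubstring1 s (findLongestSubstring1 s)

-- ===== LEMMAS AND PROOFS =====

def pvVowel (c : Char) : Bool := "aeiou".toList.contains c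

-- right-to-left spec: (max segment length, length of the first vowel-free segment)
def pvH : List Char → Int × Int
  | [] => (0, 0)
  | c :: t =>
    let p := pvH t
    if pvVowel c then (p.1, 0) else (max p.1 (p.2 + 1), p.2 + 1)

def pvVIdx (cs : List Char) (k : Int) : List Int :=
  (PySem.List.enumerate cs k).filterMap (fun p => if pvVowel p.2 then some p.1 else none)

def pvL (cs : List Char) (k : Int) : List Int := pvVIdx cs k ++ [k + (cs.length : Int)]

def pvAdj : Int → List Int → List Int
  | _, [] => []
  | p, x :: r => (x - p - 1) :: pvAdj x r

def pvF : List Int → Int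
  | [] => 0
  | x :: r => r.foldl max x

lemma pvH_inv (cs : List Char) : 0 ≤ (pvH cs).2 ∧ (pvH cs).2 ≤ (pvH cs).1 := by
  induction cs with
  | nil => simp [pvH]
  | cons c t ih => simp only [pvH]; split <;> simp <;> omega

lemma pv_foldA (cs : List Char) : ∀ (l c : Int), 0 ≤ c → c ≤ l →
    (cs.foldl (fun (st : Int × Int) ch =>
      if pvVowel ch then (st.1, 0) else (max st.1 (st.2 + 1), st.2 + 1)) (l, c)).1
    = max l (max (c + (pvH cs).2) (pvH cs).1) := by
  induction cs with
  | nil => intro l c h0 h1; simp [pvH]; omega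
  | cons ch t ih =>
    intro l c h0 h1
    have hinv := pvH_inv t
    simp only [List.foldl_cons, pvH]
    by_cases hv : pvVowel ch
    · simp only [hv, if_true]
      rw [ih l 0 le_rfl (le_trans h0 h1)]
      omega
    · simp only [hv, if_false, Bool.false_eq_true]
      rw [ih (max l (c + 1)) (c + 1) (by omega) (by omega)]
      omega

lemma pv_foldl_max_max (l : List Int) : ∀ (x y : Int),
    l.foldl max (max x y) = max x (l.foldl max y) := by
  induction l with
  | nil => intro x y; simp
  | cons a l ih =>
    intro x y
    simp only [List.foldl_cons]
    rw [max_assoc, ih]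

lemma pv_maxD_cons (l : List Int) : ∀ (d : Int),
    PySem.List.maxD (d :: l) id 0 = l.foldl max d := by
  induction l with
  | nil => intro d; rfl
  | cons a r ih =>
    intro d
    by_cases h : d < a
    · have e : PySem.List.maxD (d :: a :: r) id 0 = PySem.List.maxD (a :: r) id 0 := by
        simp only [PySem.List.maxD, PySem.List.max?, List.foldl_cons]
        congr 2
        show (if id d < id a then some a else some d) = some a
        rw [if_pos (show id d < id a from h)]
      rw [e, ih a]
      simp only [List.foldl_cons]
      rw [max_eq_right h.le]
    · have e : PySem.List.maxD (d :: a :: r) id 0 = PySem.List.maxD (d :: r) id 0 := by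
        simp only [PySem.List.maxD, PySem.List.max?, List.foldl_cons]
        congr 2
        show (if id d < id a then some a else some d) = some d
        rw [if_neg (show ¬ id d < id a from h)]
      rw [e, ih d]
      simp only [List.foldl_cons]
      rw [max_eq_left (not_lt.mp h)]

lemma pv_maxD_eq_pvF (l : List Int) : PySem.List.maxD l id 0 = pvF l := by
  cases l with
  | nil => rfl
  | cons x r => exact pv_maxD_cons r x

lemma pv_zip_adj (l : List Int) : ∀ (p : Int),
    (((p :: l).zip l).map (fun q => q.2 - q.1 - 1)) = pvAdj p l := by
  induction l with
  | nil => intro p; simp [pvAdj]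
  | cons x r ih => intro p; simp only [List.zip_cons_cons, List.map_cons, pvAdj]; rw [ih x]

lemma pv_main (cs : List Char) : ∀ (k : Int),
    (pvL cs k).head? = some (k + (pvH cs).2) ∧
    pvF (pvAdj (k - 1) (pvL cs k)) = (pvH cs).1 := by
  induction cs with
  | nil =>
    intro k
    have h1 : pvL ([] : List Char) k = [k] := by
      simp [pvL, pvVIdx, PySem.List.enumerate_nil]
    rw [h1]
    constructor
    · simp [pvH]
    · have h2 : pvAdj (k - 1) [k] = [0] := by
        show [k - (k - 1) - 1] = [0]
        congr 1
        ring
      rw [h2]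
      simp [pvF, pvH]
  | cons c t ih =>
    intro k
    have hinv := pvH_inv t
    obtain ⟨ihh, ihf⟩ := ih (k + 1)
    have hL : pvL (c :: t) k = (if pvVowel c then [k] else []) ++ pvL t (k + 1) := by
      by_cases hv : pvVowel c <;>
        simp [pvL, pvVIdx, PySem.List.enumerate_cons, hv] <;> omega
    obtain ⟨x, r, hxr⟩ : ∃ x r, pvL t (k + 1) = x :: r := by
      cases h : pvL t (k + 1) with
      | nil => rw [h] at ihh; simp at ihh
      | cons x r => exact ⟨x, r, rfl⟩
    have hx : x = k + 1 + (pvH t).2 := by rw [hxr] at ihh; simpa using ihh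
    have ihf' : List.foldl max (x - k - 1) (pvAdj x r) = (pvH t).1 := by
      have h2 := ihf
      rw [hxr] at h2
      have hstep : pvAdj (k + 1 - 1) (x :: r) = (x - k - 1) :: pvAdj x r := by
        show (x - (k + 1 - 1) - 1) :: pvAdj x r = _
        congr 1
        ring
      rw [hstep] at h2
      simpa [pvF] using h2
    by_cases hv : pvVowel c
    · rw [hL]
      simp only [hv, if_true, List.singleton_append]
      constructor
      · simp [pvH, hv]
      · rw [hxr]
        have hadj : pvAdj (k - 1) (k :: x :: r) = 0 :: (x - k - 1) :: pvAdj x r := by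
          show (k - (k - 1) - 1) :: (x - k - 1) :: pvAdj x r = _
          congr 1
          ring
        rw [hadj]
        simp only [pvF, List.foldl_cons]
        rw [pv_foldl_max_max (pvAdj x r) 0 (x - k - 1), ihf']
        simp only [pvH, hv, if_true]
        omega
    · rw [hL]
      simp only [hv, Bool.false_eq_true, if_false, List.nil_append]
      constructor
      · rw [hxr]
        simp only [List.head?_cons, Option.some.injEq]
        simp only [pvH, hv, Bool.false_eq_true, if_false]
        omega
      · rw [hxr]
        have hadj : pvAdj (k - 1) (x :: r) = (x - k) :: pvAdj x r := by
          show (x - (k - 1) - 1) :: pvAdj x r = _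
          congr 1
          ring
        rw [hadj]
        simp only [pvF]
        have e1 : (x - k : Int) = max (x - k) (x - k - 1) := by omega
        rw [e1, pv_foldl_max_max (pvAdj x r) (x - k) (x - k - 1), ihf']
        simp only [pvH, hv, Bool.false_eq_true, if_false]
        omega

lemma pvA_eq (s : String) : findLongestSubstring1 s = (pvH s.toList).1 := by
  have hset : PySem.Set.ofList "aeiou".toList = "aeiou".toList := by decide
  have hinv := pvH_inv s.toList
  simp only [findLongestSubstring1, hset]
  have hc : (fun (st : Int × Int) char =>
      if PySem.Set.contains "aeiou".toList char then (st.1, 0)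
      else (max st.1 (st.2 + 1), st.2 + 1))
      = (fun (st : Int × Int) ch =>
      if pvVowel ch then (st.1, 0) else (max st.1 (st.2 + 1), st.2 + 1)) := by
    funext st ch
    simp [PySem.Set.contains, pvVowel]
  rw [hc, pv_foldA s.toList 0 0 le_rfl le_rfl]
  omega

lemma pvB_eq (s : String) : findLongestSubstring1_alt s = (pvH s.toList).1 := by
  simp only [findLongestSubstring1_alt]
  have hcuts : [(-1 : Int)] ++ (PySem.List.enumerate s.toList 0).filterMap
      (fun p => if "aeiou".toList.contains p.2 then some p.1 else none)
      ++ [PySem.Str.len s] = (-1) :: pvL s.toList 0 := by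
    simp [pvL, pvVIdx, pvVowel, PySem.Str.len_eq]
  rw [hcuts]
  rw [PySem.List.slice_from _ (by norm_num : (0:Int) ≤ 1)]
  simp only [Int.toNat_one, List.drop_one, List.tail_cons]
  rw [pv_zip_adj (pvL s.toList 0) (-1), pv_maxD_eq_pvF]
  have h0 : (-1 : Int) = 0 - 1 := by norm_num
  rw [h0]
  exact (pv_main s.toList 0).2

-- ===== VERDICT (by name: the statement is the Claim_ definition above) =====
theorem findLongestSubstring1_spec : Claim_equal_findLongestSubstring1 := by
  intro s _
  unfold Spec_findLongestSubstring1
  rw [pvA_eq, pvB_eq]
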